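-- pv_equiv track=rewrite | github.com/AMALSHAJIKANJIRAKATTIL/Python | lucky.py | findLuckyNumber
-- ===== SOURCE A (Python) =====
-- def findLuckyNumber(nums):
--     # implement this function
--     freq={}
--     for i in nums:
--         if(i not in freq):
--             freq[i]=1
--         else:
--             freq[i]+=1
--     for i in nums:
--         if(i==freq[i]):
--             return i
-- ===== SOURCE B (Python) =====
-- def findLuckyNumber(nums):
--     # Sort, then collect lucky values by scanning runs of equal elements.
--     s = sorted(nums)
--     lucky = []
--     i = 0
--     n = len(s)
--     while i < n:
--         j = i
--         while j < n and s[j] == s[i]: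
--             j += 1
--         if s[i] == j - i:
--             lucky.append(s[i])
--         i = j
--     for x in nums:
--         if x in lucky:
--             return x
-- ===== Notes on version B (the rewrite author's own statement) =====
-- stated objective: alternative
-- what changed: Replaces the frequency dictionary with a sort: the sorted copy is scanned once, runs of equal elements give each value's frequency as a run length, lucky values are collected, and a final pass over the original list returns the first member of that set.
import Mathlib
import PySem

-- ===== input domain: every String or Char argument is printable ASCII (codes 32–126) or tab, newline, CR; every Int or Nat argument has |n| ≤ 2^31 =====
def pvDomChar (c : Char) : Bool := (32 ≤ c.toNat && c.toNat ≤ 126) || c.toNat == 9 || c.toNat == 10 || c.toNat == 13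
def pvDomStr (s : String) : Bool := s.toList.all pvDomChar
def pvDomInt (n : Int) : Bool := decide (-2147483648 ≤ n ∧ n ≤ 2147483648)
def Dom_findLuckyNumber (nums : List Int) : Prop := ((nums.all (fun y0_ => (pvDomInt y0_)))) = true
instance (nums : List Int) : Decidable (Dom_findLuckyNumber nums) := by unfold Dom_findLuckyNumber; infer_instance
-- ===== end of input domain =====

-- B replaces A's frequency dictionary by a different algorithm: sort the list, scan runs of equal
-- elements in the sorted copy to collect the values equal to their run length, then return the
-- first element of the original list belonging to that collection (objective: alternative).


-- ===== PORT A =====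
-- freq = {}; for i in nums: freq[i] = 1 if i not in freq else freq[i]+1
def luckyFreq (nums : List Int) : PySem.Dict Int Int :=
  nums.foldl (fun d i => if d.contains i = false then d.insert i 1 else d.insert i (d.getD i 0 + 1)) PySem.Dict.empty

-- for i in nums: if i == freq[i]: return i
def luckyScanA (freq : PySem.Dict Int Int) : List Int → Option Int
  | [] => none
  | i :: rest => if i = freq.getD i 0 then some i else luckyScanA freq rest

def findLuckyNumber (nums : List Int) : Option Int :=
  luckyScanA (luckyFreq nums) nums

-- ===== PORT B =====
-- the run-grouping while loop over the sorted list: a run is the maximal block of elements equal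
-- to its first element (inner 'while j < n and s[j] == s[i]'), the value is kept if it equals the
-- run length, and the loop resumes at the rest (i = j)
def collectLucky : List Int → List Int
  | [] => []
  | x :: xs =>
    if x = ((xs.takeWhile (fun y => y == x)).length + 1 : Int)
    then x :: collectLucky (xs.dropWhile (fun y => y == x))
    else collectLucky (xs.dropWhile (fun y => y == x))
  termination_by l => l.length
  decreasing_by
    all_goals simpa using Nat.lt_succ_of_le (List.length_dropWhile_le _ _)

-- for x in nums: if x in lucky: return x
def luckyScanB (lucky : List Int) : List Int → Option Int
  | [] => none
  | x :: rest => if lucky.contains x then some x else luckyScanB lucky rest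

def findLuckyNumber_alt (nums : List Int) : Option Int :=
  luckyScanB (collectLucky (PySem.List.sorted nums (fun x => x) false)) nums

-- ===== PRECONDITION & SPEC =====
def Spec_findLuckyNumber (nums : List Int) (out : Option Int) : Prop := out = findLuckyNumber_alt nums
instance (nums : List Int) (out : Option Int) : Decidable (Spec_findLuckyNumber nums out) := by unfold Spec_findLuckyNumber; infer_instance

-- ===== CLAIM (what is proved, stated in full; the proofs are below) =====
def Claim_equal_findLuckyNumber : Prop := ∀ (nums : List Int), Dom_findLuckyNumber nums → Spec_findLuckyNumber nums (findLuckyNumber nums)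

-- ===== LEMMAS AND PROOFS =====

lemma luckyFreq_eq_counter_fold (nums : List Int) (d : PySem.Dict Int Int) :
    nums.foldl (fun d i => if d.contains i = false then d.insert i 1 else d.insert i (d.getD i 0 + 1)) d
      = nums.foldl (fun d i => d.insert i (d.getD i 0 + 1)) d := by
  induction nums generalizing d with
  | nil => rfl
  | cons x xs ih =>
    simp only [List.foldl]
    rw [ih]
    congr 1
    by_cases h : d.contains x = false
    · rw [if_pos h, PySem.Dict.getD_of_not_contains d 0 h]; norm_num
    · rw [if_neg h]

lemma luckyFreq_getD (nums : List Int) (i : Int) :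
    (luckyFreq nums).getD i 0 = (nums.count i : Int) := by
  unfold luckyFreq
  rw [luckyFreq_eq_counter_fold, PySem.Dict.getD_foldl_insert_add_one, PySem.Dict.getD_empty]
  ring

lemma dropWhile_head_false {p : Int → Bool} {l : List Int} {y : Int} {ys : List Int}
    (h : l.dropWhile p = y :: ys) : p y = false := by
  induction l with
  | nil => simp at h
  | cons a t ih =>
    by_cases hp : p a
    · rw [List.dropWhile_cons_of_pos hp] at h; exact ih h
    · rw [List.dropWhile_cons_of_neg (by simpa using hp)] at h
      cases h; simpa using hp

-- every element of the dropped rest is strictly greater than the head of a sorted list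
lemma rest_gt {x : Int} {xs : List Int} (hs : (x :: xs).Pairwise (· ≤ ·)) :
    ∀ e ∈ xs.dropWhile (fun y => y == x), x < e := by
  intro e he
  rcases hrest : xs.dropWhile (fun y => y == x) with _ | ⟨y, ys⟩
  · simp [hrest] at he
  · have hymem : y ∈ xs := (List.dropWhile_sublist _).subset (by rw [hrest]; exact List.mem_cons_self)
    have hxy : x ≤ y := (List.pairwise_cons.mp hs).1 y hymem
    have hyne : y ≠ x := by
      have h2 : (y == x) = false := dropWhile_head_false (p := fun y => y == x) hrest
      intro h; rw [h] at h2; simp at h2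
    have hxy' : x < y := lt_of_le_of_ne hxy (Ne.symm hyne)
    rw [hrest] at he
    rcases List.mem_cons.mp he with rfl | he'
    · exact hxy'
    · have hp : (y :: ys).Pairwise (· ≤ ·) := by
        have := hs.sublist (List.Sublist.cons₂ x (xs.dropWhile_sublist (fun y => y == x)))
        rw [hrest] at this
        exact (List.pairwise_cons.mp this).2
      exact lt_of_lt_of_le hxy' ((List.pairwise_cons.mp hp).1 e he')

-- one step of the run-grouping loop, assuming the characterisation already holds for the rest
lemma collectLucky_cons_iff (x : Int) (xs : List Int) (hs : (x :: xs).Pairwise (· ≤ ·)) (v : Int)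
    (ih : v ∈ collectLucky (xs.dropWhile (fun y => y == x)) ↔
          v ∈ xs.dropWhile (fun y => y == x)
            ∧ ((xs.dropWhile (fun y => y == x)).count v : Int) = v) :
    v ∈ collectLucky (x :: xs) ↔ v ∈ x :: xs ∧ ((x :: xs).count v : Int) = v := by
  have hrest := rest_gt hs
  have hsplit : xs.takeWhile (fun y => y == x) ++ xs.dropWhile (fun y => y == x) = xs :=
    xs.takeWhile_append_dropWhile
  have hrun_all : ∀ b ∈ xs.takeWhile (fun y => y == x), b = x := by
    intro b hb
    have h2 := List.mem_takeWhile_imp (l := xs) (p := fun y => y == x) hb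
    exact eq_of_beq h2
  have hrestx : (xs.dropWhile (fun y => y == x)).count x = 0 :=
    List.count_eq_zero.mpr (fun hmem => absurd (hrest x hmem) (lt_irrefl x))
  by_cases hv : v = x
  · subst hv
    have hnotrest : v ∉ collectLucky (xs.dropWhile (fun y => y == v)) := by
      intro hmem
      exact absurd (hrest v (ih.mp hmem).1) (lt_irrefl v)
    have hcnt : (v :: xs).count v = (xs.takeWhile (fun y => y == v)).length + 1 := by
      conv_lhs => rw [← hsplit]
      rw [List.count_cons, List.count_append, hrestx,
        List.count_eq_length.mpr (fun b hb => (hrun_all b hb).symm)]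
      simp
    rw [collectLucky]
    by_cases hcond : v = ((xs.takeWhile (fun y => y == v)).length + 1 : Int)
    · rw [if_pos hcond]
      constructor
      · intro _
        exact ⟨List.mem_cons_self, by rw [hcnt]; push_cast; omega⟩
      · intro _; exact List.mem_cons_self
    · rw [if_neg hcond]
      constructor
      · intro hmem; exact absurd hmem hnotrest
      · rintro ⟨-, hc⟩
        exfalso
        rw [hcnt] at hc
        push_cast at hc
        omega
  · have hnotrun : v ∉ xs.takeWhile (fun y => y == x) := by
      intro hmem; exact hv (hrun_all v hmem)
    have hmemiff : v ∈ x :: xs ↔ v ∈ xs.dropWhile (fun y => y == x) := by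
      constructor
      · intro hmem
        rcases List.mem_cons.mp hmem with rfl | hmem'
        · exact absurd rfl hv
        · rw [← hsplit] at hmem'
          rcases List.mem_append.mp hmem' with h1 | h2
          · exact absurd h1 hnotrun
          · exact h2
      · intro hmem
        exact List.mem_cons_of_mem x (by rw [← hsplit]; exact List.mem_append_right _ hmem)
    have hcv : (x :: xs).count v = (xs.dropWhile (fun y => y == x)).count v := by
      conv_lhs => rw [← hsplit]
      rw [List.count_cons, List.count_append,
        List.count_eq_zero.mpr (fun hmem => hv (hrun_all v hmem))]
      simp
      exact fun h => hv h.symm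
    have hstep : v ∈ collectLucky (x :: xs) ↔ v ∈ collectLucky (xs.dropWhile (fun y => y == x)) := by
      rw [collectLucky]
      by_cases hcond : x = ((xs.takeWhile (fun y => y == x)).length + 1 : Int)
      · rw [if_pos hcond]; simp [hv]
      · rw [if_neg hcond]
    rw [hstep, ih, hcv, hmemiff]

lemma mem_collectLucky {s : List Int} (hs : s.Pairwise (· ≤ ·)) (v : Int) :
    v ∈ collectLucky s ↔ v ∈ s ∧ (s.count v : Int) = v := by
  induction s using collectLucky.induct with
  | case1 => simp [collectLucky]
  | case2 x xs hcond ih =>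
    exact collectLucky_cons_iff x xs hs v
      (ih ((List.pairwise_cons.mp hs).2.sublist (xs.dropWhile_sublist _)))
  | case3 x xs hcond ih =>
    exact collectLucky_cons_iff x xs hs v
      (ih ((List.pairwise_cons.mp hs).2.sublist (xs.dropWhile_sublist _)))

lemma cond_iff (nums : List Int) (x : Int) (hx : x ∈ nums) :
    (x = (luckyFreq nums).getD x 0)
      ↔ x ∈ collectLucky (PySem.List.sorted nums (fun x => x) false) := by
  have hperm : (PySem.List.sorted nums (fun x => x) false).Perm nums :=
    PySem.List.sorted_perm nums (fun x => x) false
  have hpw : (PySem.List.sorted nums (fun x => x) false).Pairwise (· ≤ ·) := by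
    simpa using PySem.List.sorted_pairwise (xs := nums) (key := fun x => x)
  rw [luckyFreq_getD, mem_collectLucky hpw, hperm.count_eq, hperm.mem_iff]
  constructor
  · intro h; exact ⟨hx, h.symm⟩
  · rintro ⟨-, h⟩; exact h.symm

lemma scan_eq (nums : List Int) (rest : List Int) (hsub : ∀ e ∈ rest, e ∈ nums) :
    luckyScanA (luckyFreq nums) rest
      = luckyScanB (collectLucky (PySem.List.sorted nums (fun x => x) false)) rest := by
  induction rest with
  | nil => rfl
  | cons x xs ih =>
    have hx : x ∈ nums := hsub x List.mem_cons_self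
    simp only [luckyScanA, luckyScanB]
    by_cases h : x = (luckyFreq nums).getD x 0
    · rw [if_pos h, if_pos (by
        simpa using (cond_iff nums x hx).mp h)]
    · rw [if_neg h, if_neg (by
        simp only [List.contains_iff_mem]
        exact fun hm => h ((cond_iff nums x hx).mpr hm)),
        ih (fun e he => hsub e (List.mem_cons_of_mem x he))]

-- ===== VERDICT (by name: the statement is the Claim_ definition above) =====
theorem findLuckyNumber_spec : Claim_equal_findLuckyNumber := by
  intro nums _
  unfold Spec_findLuckyNumber findLuckyNumber findLuckyNumber_alt
  exact scan_eq nums nums (fun _ h => h)
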